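-- pv_equiv track=rewrite | github.com/ethomas2/book-rag | app.py | validate_quotes
-- ===== SOURCE A (Python) =====
-- from typing import List
--
-- def validate_quotes(quotes: List[str], chapter_text: str) -> tuple[List[str], List[str]]:
--     """Validate that all quotes exist word-for-word in the chapter text"""
--     valid_quotes = []
--     invalid_quotes = []
--
--     for quote in quotes:
--         # Clean the quote (remove extra whitespace)
--         cleaned_quote = ' '.join(quote.split())
--         if cleaned_quote in chapter_text:
--             valid_quotes.append(quote)
--         else:
--             invalid_quotes.append(quote)
--
--     return valid_quotes, invalid_quotes
-- ===== SOURCE B (Python) =====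
-- def validate_quotes(quotes, chapter_text):
--     """Validate that all quotes exist word-for-word in the chapter text.
--
--     B: clean each quote once, memoize the substring search per distinct
--     cleaned quote in a dict (one search per distinct quote instead of one
--     per quote), then split the list with two comprehensions."""
--     cleaned = [' '.join(q.split()) for q in quotes]
--     verdict = {}
--     for c in cleaned:
--         if c not in verdict:
--             verdict[c] = c in chapter_text
--     valid = [q for q, c in zip(quotes, cleaned) if verdict[c]]
--     invalid = [q for q, c in zip(quotes, cleaned) if not verdict[c]]
--     return valid, invalid
-- ===== Notes on version B (the rewrite author's own statement) =====
-- stated objective: alternative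
-- what changed: B cleans all quotes in one pass, memoizes the substring search per distinct cleaned quote in a dict (one search per distinct quote instead of one per occurrence), and builds the two output lists with two comprehensions over quote/cleaned pairs instead of A's single accumulating loop.
import Mathlib
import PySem

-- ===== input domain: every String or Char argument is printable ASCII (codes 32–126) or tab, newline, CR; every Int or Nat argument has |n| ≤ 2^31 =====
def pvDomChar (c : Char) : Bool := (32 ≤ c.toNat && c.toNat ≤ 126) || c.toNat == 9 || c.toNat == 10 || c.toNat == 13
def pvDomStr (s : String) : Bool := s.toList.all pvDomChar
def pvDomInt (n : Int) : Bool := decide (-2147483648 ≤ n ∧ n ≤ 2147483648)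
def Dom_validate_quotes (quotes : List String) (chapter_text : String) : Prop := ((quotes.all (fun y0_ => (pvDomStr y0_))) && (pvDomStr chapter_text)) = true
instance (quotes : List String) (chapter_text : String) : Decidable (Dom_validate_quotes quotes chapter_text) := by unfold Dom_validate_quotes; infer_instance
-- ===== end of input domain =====

-- B memoizes the substring test per distinct cleaned quote in a dict and splits the
-- list with two filters; same return value as A, proved equal on all inputs.

-- ===== PORT A =====
-- A: one loop, appending each quote to valid_quotes or invalid_quotes.
def validate_quotes (quotes : List String) (chapter_text : String) : List String × List String :=
  quotes.foldl
    (fun (acc : List String × List String) quote =>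
      let cleaned_quote := PySem.Str.join " " (PySem.Str.split₀ quote)
      if PySem.Str.isIn cleaned_quote chapter_text then
        (acc.1 ++ [quote], acc.2)
      else
        (acc.1, acc.2 ++ [quote]))
    ([], [])

-- ===== PORT B =====
-- ' '.join(q.split())
def vqClean (q : String) : String := PySem.Str.join " " (PySem.Str.split₀ q)

def validate_quotes_alt (quotes : List String) (chapter_text : String) : List String × List String :=
  let cleaned := quotes.map vqClean
  let verdict := cleaned.foldl
    (fun (d : PySem.Dict String Bool) c =>
      if d.contains c then d else d.insert c (PySem.Str.isIn c chapter_text))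
    PySem.Dict.empty
  -- verdict[c]: the key is always present, so getD is exact for Python's d[c]
  let pairs := quotes.zip cleaned
  ((pairs.filter (fun p => verdict.getD p.2 false)).map Prod.fst,
   (pairs.filter (fun p => !(verdict.getD p.2 false))).map Prod.fst)

-- ===== PRECONDITION & SPEC =====
def Spec_validate_quotes (quotes : List String) (chapter_text : String) (out : List String × List String) : Prop := out = validate_quotes_alt quotes chapter_text
instance (quotes : List String) (chapter_text : String) (out : List String × List String) : Decidable (Spec_validate_quotes quotes chapter_text out) := by unfold Spec_validate_quotes; infer_instance

-- ===== CLAIM (what is proved, stated in full; the proofs are below) =====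
def Claim_equal_validate_quotes : Prop := ∀ (quotes : List String) (chapter_text : String), Dom_validate_quotes quotes chapter_text → Spec_validate_quotes quotes chapter_text (validate_quotes quotes chapter_text)

-- ===== LEMMAS AND PROOFS =====

-- A's loop is the pair of filters by the cleaned-substring test.
theorem vq_foldA (ct : String) :
    ∀ (qs : List String) (acc : List String × List String),
      qs.foldl
        (fun (acc : List String × List String) quote =>
          let cleaned_quote := PySem.Str.join " " (PySem.Str.split₀ quote)
          if PySem.Str.isIn cleaned_quote ct then
            (acc.1 ++ [quote], acc.2)
          else
            (acc.1, acc.2 ++ [quote])) acc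
      = (acc.1 ++ qs.filter (fun q => PySem.Str.isIn (vqClean q) ct),
         acc.2 ++ qs.filter (fun q => !(PySem.Str.isIn (vqClean q) ct))) := by
  intro qs
  induction qs with
  | nil => intro acc; simp only [List.foldl_nil, List.filter_nil, List.append_nil]
  | cons h t ih =>
    intro acc
    rw [List.foldl_cons, List.filter_cons, List.filter_cons]
    by_cases hc : PySem.Str.isIn (vqClean h) ct = true
    · simp only [vqClean] at hc ⊢
      simp only [hc, if_true, Bool.not_true, Bool.false_eq_true, if_false, ih]
      simp [vqClean]
    · simp only [Bool.not_eq_true] at hc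
      simp only [vqClean] at hc ⊢
      simp only [hc, Bool.false_eq_true, if_false, Bool.not_false, if_true, ih]
      simp [vqClean]

-- The memo dict answers the substring test on every key it has seen.
theorem vq_memo (ct : String) :
    ∀ (l : List String) (d : PySem.Dict String Bool),
      (∀ k, d.contains k = true → d.getD k false = PySem.Str.isIn k ct) →
      ∀ c, (c ∈ l ∨ d.contains c = true) →
        (l.foldl
          (fun (d : PySem.Dict String Bool) c =>
            if d.contains c then d else d.insert c (PySem.Str.isIn c ct)) d).getD c false
        = PySem.Str.isIn c ct := by
  intro l
  induction l with
  | nil =>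
    intro d hd c hc
    rcases hc with hc | hc
    · simp at hc
    · exact hd c hc
  | cons h t ih =>
    intro d hd c hc
    rw [List.foldl_cons]
    by_cases hh : d.contains h = true
    · rw [if_pos hh]
      apply ih d hd
      rcases hc with hc | hc
      · rcases List.mem_cons.mp hc with rfl | hm
        · exact Or.inr hh
        · exact Or.inl hm
      · exact Or.inr hc
    · rw [if_neg (by simp [hh])]
      apply ih
      · intro k hk
        rw [PySem.Dict.getD_insert]
        by_cases hkh : k = h
        · simp [hkh]
        · rw [if_neg hkh]
          apply hd
          rw [PySem.Dict.contains_insert] at hk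
          simpa [hkh] using hk
      · rcases hc with hc | hc
        · rcases List.mem_cons.mp hc with rfl | hm
          · exact Or.inr (PySem.Dict.contains_insert_self d c _)
          · exact Or.inl hm
        · exact Or.inr (by rw [PySem.Dict.contains_insert]; simp [hc])

-- Filtering the (quote, cleaned) pairs and projecting = filtering the quotes.
theorem vq_zip_filter (ct : String) :
    ∀ (qs : List String),
      ((qs.zip (qs.map vqClean)).filter (fun p => PySem.Str.isIn p.2 ct)).map Prod.fst
      = qs.filter (fun q => PySem.Str.isIn (vqClean q) ct) := by
  intro qs
  induction qs with
  | nil => simp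
  | cons h t ih =>
    rw [List.map_cons, List.zip_cons_cons, List.filter_cons, List.filter_cons]
    by_cases hg : PySem.Str.isIn (vqClean h) ct = true
    · simp only [hg, if_true, List.map_cons, ih]
    · rw [Bool.not_eq_true] at hg
      simp only [hg, Bool.false_eq_true, if_false, ih]

theorem vq_zip_filter_not (ct : String) :
    ∀ (qs : List String),
      ((qs.zip (qs.map vqClean)).filter (fun p => !(PySem.Str.isIn p.2 ct))).map Prod.fst
      = qs.filter (fun q => !(PySem.Str.isIn (vqClean q) ct)) := by
  intro qs
  induction qs with
  | nil => simp
  | cons h t ih =>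
    rw [List.map_cons, List.zip_cons_cons, List.filter_cons, List.filter_cons]
    by_cases hg : PySem.Str.isIn (vqClean h) ct = true
    · simp only [hg, Bool.not_true, Bool.false_eq_true, if_false, ih]
    · rw [Bool.not_eq_true] at hg
      simp only [hg, Bool.not_false, if_true, List.map_cons, ih]

-- ===== VERDICT (by name: the statement is the Claim_ definition above) =====
theorem validate_quotes_spec : Claim_equal_validate_quotes := by
  intro quotes ct _
  unfold Spec_validate_quotes validate_quotes validate_quotes_alt
  rw [vq_foldA ct quotes ([], [])]
  simp only [List.nil_append]
  have hmem : ∀ p ∈ quotes.zip (quotes.map vqClean),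
      ((quotes.map vqClean).foldl
        (fun (d : PySem.Dict String Bool) c =>
          if d.contains c then d else d.insert c (PySem.Str.isIn c ct))
        PySem.Dict.empty).getD p.2 false = PySem.Str.isIn p.2 ct := by
    intro p hp
    obtain ⟨a, b⟩ := p
    exact vq_memo ct (quotes.map vqClean) PySem.Dict.empty
      (by intro k hk; simp [PySem.Dict.contains_empty] at hk)
      b (Or.inl (List.of_mem_zip hp).2)
  have hmem' : ∀ p ∈ quotes.zip (quotes.map vqClean),
      (!((quotes.map vqClean).foldl
        (fun (d : PySem.Dict String Bool) c =>
          if d.contains c then d else d.insert c (PySem.Str.isIn c ct))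
        PySem.Dict.empty).getD p.2 false) = !(PySem.Str.isIn p.2 ct) := by
    intro p hp; rw [hmem p hp]
  rw [List.filter_congr hmem, List.filter_congr hmem', vq_zip_filter, vq_zip_filter_not]
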